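-- pv_equiv track=rewrite | github.com/TheoryInPractice/practical-oct | src/akiba_iwata/solver.py | _certificate_to_oct
-- ===== SOURCE A (Python) =====
-- from typing import List
--
-- def _certificate_to_oct(num_vertices: int,
--                         certificate: List[int]) -> List[int]:
--     """Transform a VC certificate into an OCT certificate
--
--     Parameters
--     ----------
--     num_vertices : int
--         The number of vertices present in the VC formulation graph. This graph
--         is expected to have vertex labels normalized to the range
--         0..num_vertices.
--     certificate : List[int]
--         Vertices present in a solution to the VC formulation.
--
--     Returns
--     -------
--     List[int]
--         A list of vertices forming a valid certificate to the OCT formulation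
--         of the problem.
--     """
--     if not num_vertices % 2 == 0:
--         raise Exception(
--             'Converting a certificate from the VC formulation to the OCT '
--             'formulation expects an even number of vertices.'
--         )
--
--     # The VC formulation doubles OCT vertices, so halve the number of vertices
--     # to go in the opposite direction.
--     num_vertices //= 2
--
--     # Store all vertices in the certificate as a set
--     vertex_set = set(certificate)
--
--     # Construct new vertex
--     return [
--         n
--         for n in range(num_vertices)
--         if n in vertex_set and (n + num_vertices) in vertex_set
--     ]
-- ===== SOURCE B (Python) =====
-- from typing import List
--
-- def _certificate_to_oct(num_vertices: int,
--                         certificate: List[int]) -> List[int]: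
--     if not num_vertices % 2 == 0:
--         raise Exception(
--             'Converting a certificate from the VC formulation to the OCT '
--             'formulation expects an even number of vertices.'
--         )
--     half = num_vertices // 2
--     lower = {c for c in certificate if c < half}
--     upper = {c - half for c in certificate if c >= half}
--     return sorted(lower & upper)
-- ===== Notes on version B (the rewrite author's own statement) =====
-- stated objective: idiomatic
-- what changed: Instead of scanning range(num_vertices//2) with two membership tests against one set, B partitions the certificate itself into a lower-half set and a shifted upper-half set and returns the sorted set intersection.
import Mathlib
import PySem

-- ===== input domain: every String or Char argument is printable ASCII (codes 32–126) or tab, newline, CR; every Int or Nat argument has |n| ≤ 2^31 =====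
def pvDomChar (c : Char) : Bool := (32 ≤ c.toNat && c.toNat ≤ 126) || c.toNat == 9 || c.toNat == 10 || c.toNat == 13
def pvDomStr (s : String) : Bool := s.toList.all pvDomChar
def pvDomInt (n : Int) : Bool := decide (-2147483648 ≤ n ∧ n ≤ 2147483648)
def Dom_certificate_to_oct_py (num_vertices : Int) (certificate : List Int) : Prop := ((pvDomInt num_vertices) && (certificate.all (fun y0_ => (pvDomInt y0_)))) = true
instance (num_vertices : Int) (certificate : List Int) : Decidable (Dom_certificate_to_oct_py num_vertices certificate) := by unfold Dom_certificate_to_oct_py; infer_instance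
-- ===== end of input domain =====

-- B replaces A's range scan with two membership tests by partitioning the
-- certificate into a lower-half set and a shifted upper-half set and sorting
-- their intersection (idiomatic set intersection; similar cost).


-- ===== PORT A =====
def certificate_to_oct_py (num_vertices : Int) (certificate : List Int) : List Int :=
  -- (the raise on odd num_vertices is excluded by Pre_)
  let nv := PySem.Int.floordiv num_vertices 2
  let vertexSet : PySem.Set Int := PySem.Set.ofList certificate
  (PySem.List.pyRange 0 nv 1).filter
    (fun n => PySem.Set.contains vertexSet n && PySem.Set.contains vertexSet (n + nv))

-- ===== PORT B =====
def certificate_to_oct_py_alt (num_vertices : Int) (certificate : List Int) : List Int :=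
  let half := PySem.Int.floordiv num_vertices 2
  let lower : PySem.Set Int := PySem.Set.ofList (certificate.filter (fun c => decide (c < half)))
  let upper : PySem.Set Int :=
    PySem.Set.ofList ((certificate.filter (fun c => decide (half ≤ c))).map (fun c => c - half))
  PySem.List.sorted (PySem.Set.inter lower upper) (fun x => x) false

-- ===== PRECONDITION & SPEC =====
-- Pre_ excludes exactly odd num_vertices, where A (and B) raise an Exception.
def Pre_certificate_to_oct_py (num_vertices : Int) (certificate : List Int) : Prop :=
  PySem.Int.mod num_vertices 2 = 0
instance (num_vertices : Int) (certificate : List Int) : Decidable (Pre_certificate_to_oct_py num_vertices certificate) := by unfold Pre_certificate_to_oct_py; infer_instance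

def pvWitness_certificate_to_oct_py : Int × List Int := (8, [0, 4, 1, 6, 2])

def Spec_certificate_to_oct_py (num_vertices : Int) (certificate : List Int) (out : List Int) : Prop := out = certificate_to_oct_py_alt num_vertices certificate
instance (num_vertices : Int) (certificate : List Int) (out : List Int) : Decidable (Spec_certificate_to_oct_py num_vertices certificate out) := by unfold Spec_certificate_to_oct_py; infer_instance

-- ===== CLAIM (what is proved, stated in full; the proofs are below) =====
def Claim_equal_certificate_to_oct_py : Prop := ∀ (num_vertices : Int) (certificate : List Int), Dom_certificate_to_oct_py num_vertices certificate → Pre_certificate_to_oct_py num_vertices certificate → Spec_certificate_to_oct_py num_vertices certificate (certificate_to_oct_py num_vertices certificate)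

-- ===== LEMMAS AND PROOFS =====

-- ===== VERDICT (by name: the statement is the Claim_ definition above) =====
theorem certificate_to_oct_py_spec : Claim_equal_certificate_to_oct_py := by
  intro nv cert _ _
  unfold Spec_certificate_to_oct_py certificate_to_oct_py certificate_to_oct_py_alt
  set h := PySem.Int.floordiv nv 2 with hh
  refine (PySem.List.sorted_eq_of_perm_of_pairwise_lt _ _ _ ?_ ?_).symm
  · -- A's output is a permutation of the intersection list
    refine (List.perm_ext_iff_of_nodup ?_ ?_).mpr ?_
    · exact (PySem.List.pairwise_lt_pyRange_one 0 h).filter _ |>.nodup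
    · exact PySem.Set.nodup_inter _ _ (PySem.Set.nodup_ofList _)
    · intro n
      simp only [List.mem_filter, PySem.List.mem_pyRange_one, PySem.Set.mem_inter,
        PySem.Set.mem_ofList, List.mem_map, Bool.and_eq_true,
        PySem.Set.contains_iff, decide_eq_true_eq]
      constructor
      · rintro ⟨⟨h0, hlt⟩, hmem, hmem2⟩
        exact ⟨⟨hmem, hlt⟩, n + h, ⟨hmem2, by omega⟩, by omega⟩
      · rintro ⟨⟨hmem, hlt⟩, c, ⟨hc, hch⟩, hce⟩
        exact ⟨⟨by omega, hlt⟩, hmem, by rw [show n + h = c by omega]; exact hc⟩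
  · exact (PySem.List.pairwise_lt_pyRange_one 0 h).filter _
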